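-- pv_equiv track=rewrite | github.com/gwdio/Pylint_Helper | classify.py | order_categories
-- ===== SOURCE A (Python) =====
-- from collections import defaultdict, OrderedDict
--
-- PREFERRED_ORDER = [
--         "Unused import",
--         "Import order",
--         "Trailing whitespace",
--         "Line too long",
--         "Missing docstring",
--         "Missing type annotation",
--         "Type error",
--         "Unresolved module",
--         "Unused variable/argument",
--         "Unnecessary pass statement",
--         "TODO",
--         "Naming style",
--         "Complexity limit",
--         "Redefined name"
--         "Bad code logic",
--     ]
--
-- def order_categories(cat_lines_map: dict[str, set[int]]) -> OrderedDict:
--     ordered = OrderedDict()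
--     for cat in PREFERRED_ORDER:
--         if cat in cat_lines_map:
--             ordered[cat] = sorted(cat_lines_map[cat])
--     # include any categories not in preferred list
--     for cat in sorted(cat_lines_map.keys()):
--         if cat not in ordered:
--             ordered[cat] = sorted(cat_lines_map[cat])
--     return ordered
-- ===== SOURCE B (Python) =====
-- # B: one rank-keyed sort replaces A's two guarded passes; builds the OrderedDict from a single ordered key list.
-- from collections import OrderedDict
--
-- PREFERRED_ORDER = [
--         "Unused import",
--         "Import order",
--         "Trailing whitespace",
--         "Line too long",
--         "Missing docstring",
--         "Missing type annotation",
--         "Type error",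
--         "Unresolved module",
--         "Unused variable/argument",
--         "Unnecessary pass statement",
--         "TODO",
--         "Naming style",
--         "Complexity limit",
--         "Redefined name"
--         "Bad code logic",
--     ]
--
-- def order_categories(cat_lines_map: dict[str, set[int]]) -> OrderedDict:
--     rank = {cat: i for i, cat in enumerate(PREFERRED_ORDER)}
--     n = len(PREFERRED_ORDER)
--     ordered = OrderedDict()
--     for cat in sorted(cat_lines_map, key=lambda c: (rank.get(c, n), c)):
--         ordered[cat] = sorted(cat_lines_map[cat])
--     return ordered
-- ===== Notes on version B (the rewrite author's own statement) =====
-- stated objective: simpler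
-- what changed: A's two guarded passes (preferred list scan with membership tests, then a sorted-keys scan skipping already-inserted categories) are collapsed into a single sort of the keys by the composite key (rank.get(c, n), c) using a rank dict built once from PREFERRED_ORDER, followed by one unguarded insertion loop.
import Mathlib
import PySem

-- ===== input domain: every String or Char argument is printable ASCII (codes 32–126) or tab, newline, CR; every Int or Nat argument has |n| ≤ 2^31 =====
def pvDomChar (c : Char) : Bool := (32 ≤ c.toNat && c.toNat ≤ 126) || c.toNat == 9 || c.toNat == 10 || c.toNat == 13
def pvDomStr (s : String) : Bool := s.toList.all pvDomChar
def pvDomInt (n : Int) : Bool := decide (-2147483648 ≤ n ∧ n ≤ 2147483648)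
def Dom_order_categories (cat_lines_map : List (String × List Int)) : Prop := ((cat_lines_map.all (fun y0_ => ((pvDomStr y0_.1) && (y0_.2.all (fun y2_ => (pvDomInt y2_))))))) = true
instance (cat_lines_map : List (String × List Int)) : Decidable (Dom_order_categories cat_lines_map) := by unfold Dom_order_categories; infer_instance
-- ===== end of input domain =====

-- B replaces A's two guarded passes by one rank-keyed sort of the keys; same return value, proved below.

-- module constant PREFERRED_ORDER (the adjacent-literal concatenation "Redefined name" "Bad code logic" is kept as in the source)
def preferredOrder : List String :=
  ["Unused import", "Import order", "Trailing whitespace", "Line too long",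
   "Missing docstring", "Missing type annotation", "Type error", "Unresolved module",
   "Unused variable/argument", "Unnecessary pass statement", "TODO", "Naming style",
   "Complexity limit", "Redefined nameBad code logic"]

-- first-match association-list lookup = Python's dict subscript under the type convention
-- (both ports only apply it to keys present in the list; the [] default is never observed there)
def pyDictGet (m : List (String × List Int)) (c : String) : List Int :=
  ((m.find? (fun p => p.1 == c)).map Prod.snd).getD []

-- sorted(cat_lines_map[cat]): the value both programs store for a key
def sortedVal (m : List (String × List Int)) (c : String) : List Int :=
  PySem.List.sorted (pyDictGet m c) (fun x => x) false

-- ===== PORT A =====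
-- ordered = OrderedDict(); loop 1 over PREFERRED_ORDER (guarded insert); loop 2 over sorted(keys)
-- (guarded insert); the second foldl starts from the result of the first ('ordered' reassigned in place).
def order_categories (cat_lines_map : List (String × List Int)) : List (String × List Int) :=
  ((PySem.List.sorted (cat_lines_map.map Prod.fst) (fun x => x) false).foldl
     (fun d cat => if d.contains cat then d
                   else d.insert cat (sortedVal cat_lines_map cat))
     (preferredOrder.foldl
        (fun d cat => if (cat_lines_map.map Prod.fst).contains cat then
                        d.insert cat (sortedVal cat_lines_map cat)
                      else d)
        PySem.Dict.empty)).items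

-- ===== PORT B =====
-- rank = {cat: i for i, cat in enumerate(PREFERRED_ORDER)}
def rankDict : PySem.Dict String Int :=
  (PySem.List.enumerate preferredOrder 0).foldl (fun d p => d.insert p.2 p.1) PySem.Dict.empty

-- single sort of the keys by (rank.get(c, n), c), then one unguarded insert loop
def order_categories_alt (cat_lines_map : List (String × List Int)) : List (String × List Int) :=
  ((PySem.List.sorted2 (cat_lines_map.map Prod.fst)
      (fun c => rankDict.getD c (preferredOrder.length : Int)) (fun c => c) false).foldl
     (fun d cat => d.insert cat (sortedVal cat_lines_map cat))
     PySem.Dict.empty).items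

-- ===== PRECONDITION & SPEC =====
def Spec_order_categories (cat_lines_map : List (String × List Int)) (out : List (String × List Int)) : Prop := out = order_categories_alt cat_lines_map
instance (cat_lines_map : List (String × List Int)) (out : List (String × List Int)) : Decidable (Spec_order_categories cat_lines_map out) := by unfold Spec_order_categories; infer_instance

-- ===== CLAIM (what is proved, stated in full; the proofs are below) =====
def Claim_equal_order_categories : Prop := ∀ (cat_lines_map : List (String × List Int)), Dom_order_categories cat_lines_map → Spec_order_categories cat_lines_map (order_categories cat_lines_map)

-- ===== LEMMAS AND PROOFS =====

-- B's composite sort key, and the boolean 'comes strictly before' relation sorted2 uses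
def rk (c : String) : Int := rankDict.getD c (preferredOrder.length : Int)
def beforeB (a b : String) : Bool :=
  decide (rk a < rk b) || (!decide (rk b < rk a) && decide (a < b))
def Rle (a b : String) : Prop := beforeB b a = false

lemma beforeB_eq_true_iff (a b : String) :
    beforeB a b = true ↔ rk a < rk b ∨ (¬ rk b < rk a ∧ a < b) := by
  simp [beforeB]

lemma beforeB_eq_false_iff (a b : String) :
    beforeB a b = false ↔ ¬ rk a < rk b ∧ (rk b < rk a ∨ ¬ a < b) := by
  simp [beforeB, imp_iff_not_or]

lemma beforeB_asym (a b : String) (h : beforeB a b = true) : beforeB b a = false := by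
  rw [beforeB_eq_true_iff] at h
  rw [beforeB_eq_false_iff]
  rcases h with h | ⟨h1, h2⟩
  · exact ⟨fun h' => absurd h (lt_asymm h'), Or.inl h⟩
  · exact ⟨h1, Or.inr (lt_asymm h2)⟩

lemma beforeB_trans (a b c : String) (h1 : beforeB a b = true) (h2 : beforeB b c = true) :
    beforeB a c = true := by
  rw [beforeB_eq_true_iff] at h1 h2 ⊢
  rcases h1 with h1 | ⟨h1a, h1b⟩ <;> rcases h2 with h2 | ⟨h2a, h2b⟩
  · exact Or.inl (lt_trans h1 h2)
  · exact Or.inl (lt_of_lt_of_le h1 (not_lt.mp h2a))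
  · exact Or.inl (lt_of_le_of_lt (not_lt.mp h1a) h2)
  · exact Or.inr ⟨fun h' => h1a (lt_of_le_of_lt (not_lt.mp h2a) h'), lt_trans h1b h2b⟩

lemma Rle_antisymm (a b : String) (h1 : Rle a b) (h2 : Rle b a) : a = b := by
  unfold Rle at h1 h2
  rw [beforeB_eq_false_iff] at h1 h2
  rcases h1 with ⟨hba, h1⟩
  rcases h2 with ⟨hab, h2⟩
  rcases h1 with h | h
  · exact absurd h hab
  · rcases h2 with h' | h'
    · exact absurd h' hba
    · exact le_antisymm (not_lt.mp h) (not_lt.mp h')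

-- rank facts about the literal preferred list
lemma nodup_preferred : preferredOrder.Nodup := by decide
lemma rk_pairwise : preferredOrder.Pairwise (fun a b => rk a < rk b) := by decide
lemma rk_lt_of_mem (c : String) (h : c ∈ preferredOrder) : rk c < (preferredOrder.length : Int) := by
  revert c
  decide
lemma rk_of_not_mem (c : String) (h : c ∉ preferredOrder) : rk c = (preferredOrder.length : Int) := by
  unfold rk
  apply PySem.Dict.getD_of_not_contains
  rw [PySem.Dict.contains_eq_decide_mem_keys]
  have hk : rankDict.keys = preferredOrder := by decide
  simp [hk, h]

-- insertion sort by a strict-order 'before' yields a Pairwise-not-reversed list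
lemma insertBy_pairwise_strict (before : String → String → Bool)
    (asym : ∀ a b, before a b = true → before b a = false)
    (htrans : ∀ a b c, before a b = true → before b c = true → before a c = true)
    (x : String) (ys : List String) (h : ys.Pairwise (fun a b => before b a = false)) :
    (PySem.List.insertBy before x ys).Pairwise (fun a b => before b a = false) := by
  induction ys with
  | nil => simp [PySem.List.insertBy]
  | cons y ys ih =>
    rw [List.pairwise_cons] at h
    obtain ⟨hy, hys⟩ := h
    by_cases hxy : before x y = true
    · simp only [PySem.List.insertBy, hxy, if_true]
      refine List.Pairwise.cons ?_ (List.Pairwise.cons hy hys)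
      intro z hz
      rcases List.mem_cons.mp hz with rfl | hz
      · exact asym x z hxy
      · by_contra hzx
        rw [Bool.not_eq_false] at hzx
        have h2 := htrans z x y hzx hxy
        rw [hy z hz] at h2
        exact Bool.false_ne_true h2
    · simp only [PySem.List.insertBy, hxy]
      refine List.Pairwise.cons ?_ (ih hys)
      intro z hz
      rcases (PySem.List.insertBy_mem_iff before x z ys).mp hz with rfl | hz
      · simpa using hxy
      · exact hy z hz

lemma foldl_insertBy_pairwise_strict (before : String → String → Bool)
    (asym : ∀ a b, before a b = true → before b a = false)
    (htrans : ∀ a b c, before a b = true → before b c = true → before a c = true)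
    (xs acc : List String) (hacc : acc.Pairwise (fun a b => before b a = false)) :
    (xs.foldl (fun acc x => PySem.List.insertBy before x acc) acc).Pairwise
      (fun a b => before b a = false) := by
  induction xs generalizing acc with
  | nil => exact hacc
  | cons x xs ih =>
    exact ih _ (insertBy_pairwise_strict before asym htrans x acc hacc)

-- the ordered list of first occurrences of l whose key is not in seen
def newKeys (seen : List String) : List String → List String
  | [] => []
  | c :: t => if c ∈ seen then newKeys seen t else c :: newKeys (c :: seen) t

lemma newKeys_congr (s₁ s₂ l : List String) (h : ∀ x, x ∈ s₁ ↔ x ∈ s₂) :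
    newKeys s₁ l = newKeys s₂ l := by
  induction l generalizing s₁ s₂ with
  | nil => rfl
  | cons c t ih =>
    simp only [newKeys, h c]
    split
    · exact ih s₁ s₂ h
    · rw [ih (c :: s₁) (c :: s₂) (fun x => by simp [h x])]

lemma mem_newKeys (s l : List String) (x : String) :
    x ∈ newKeys s l ↔ x ∈ l ∧ x ∉ s := by
  induction l generalizing s with
  | nil => simp [newKeys]
  | cons c t ih =>
    simp only [newKeys]
    split <;> rename_i hc
    · rw [ih]
      constructor
      · exact fun h => ⟨List.mem_cons_of_mem c h.1, h.2⟩
      · rintro ⟨h1, h2⟩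
        rcases List.mem_cons.mp h1 with rfl | h1
        · exact absurd hc h2
        · exact ⟨h1, h2⟩
    · constructor
      · intro h
        rcases List.mem_cons.mp h with rfl | h
        · exact ⟨List.mem_cons_self, hc⟩
        · obtain ⟨h1, h2⟩ := (ih _).mp h
          exact ⟨List.mem_cons_of_mem c h1, fun hs => h2 (List.mem_cons_of_mem c hs)⟩
      · rintro ⟨h1, h2⟩
        rcases List.mem_cons.mp h1 with rfl | h1
        · exact List.mem_cons_self
        · by_cases hx : x = c
          · exact hx ▸ List.mem_cons_self
          · refine List.mem_cons_of_mem c ((ih _).mpr ⟨h1, ?_⟩)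
            simp only [List.mem_cons, not_or]
            exact ⟨hx, h2⟩

lemma newKeys_sublist (s l : List String) : List.Sublist (newKeys s l) l := by
  induction l generalizing s with
  | nil => simp [newKeys]
  | cons c t ih =>
    simp only [newKeys]
    split
    · exact (ih s).cons c
    · exact (ih (c :: s)).cons₂ c

lemma nodup_newKeys (s l : List String) : (newKeys s l).Nodup := by
  induction l generalizing s with
  | nil => exact List.nodup_nil
  | cons c t ih =>
    simp only [newKeys]
    split
    · exact ih s
    · refine List.Nodup.cons ?_ (ih (c :: s))
      intro hc
      exact ((mem_newKeys (c :: s) t c).mp hc).2 (List.mem_cons_self)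

lemma newKeys_eq_self (s l : List String) (h1 : ∀ x ∈ l, x ∉ s) (h2 : l.Nodup) :
    newKeys s l = l := by
  induction l generalizing s with
  | nil => rfl
  | cons c t ih =>
    rw [List.nodup_cons] at h2
    simp only [newKeys, if_neg (h1 c List.mem_cons_self)]
    congr 1
    refine ih (c :: s) ?_ h2.2
    intro x hx
    simp only [List.mem_cons, not_or]
    exact ⟨fun he => h2.1 (he ▸ hx), h1 x (List.mem_cons_of_mem c hx)⟩

-- A's second loop: guarded inserts append exactly the new keys in first-occurrence order
lemma loop2_items (v : String → List Int) (l : List String) (d : PySem.Dict String (List Int))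
    (hnd : d.keys.Nodup) :
    (l.foldl (fun d c => if d.contains c then d else d.insert c (v c)) d).items
      = d.items ++ (newKeys d.keys l).map (fun c => (c, v c)) := by
  induction l generalizing d with
  | nil => simp [newKeys]
  | cons c t ih =>
    simp only [List.foldl_cons]
    by_cases hc : d.contains c = true
    · rw [if_pos hc, ih d hnd]
      have hck : c ∈ d.keys := (PySem.Dict.contains_iff_mem_keys d c).mp hc
      simp only [newKeys, if_pos hck]
    · rw [if_neg hc]
      have hc' : d.contains c = false := by simpa using hc
      have hck : c ∉ d.keys := fun h => hc ((PySem.Dict.contains_iff_mem_keys d c).mpr h)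
      have hkeys : (d.insert c (v c)).keys = d.keys ++ [c] :=
        PySem.Dict.keys_insert_of_not_contains d (v c) hc'
      have hnd' : (d.insert c (v c)).keys.Nodup := by
        rw [hkeys]
        refine List.Nodup.append hnd (List.nodup_singleton c) ?_
        intro a ha hb
        rw [List.mem_singleton] at hb
        exact hck (hb ▸ ha)
      rw [ih _ hnd', PySem.Dict.items_insert_of_not_contains d (v c) hc', hkeys,
        newKeys_congr (d.keys ++ [c]) (c :: d.keys) t (fun x => by simp [or_comm])]
      simp only [newKeys, if_neg hck, List.map_cons, List.append_assoc, List.singleton_append]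

-- B's loop: unguarded inserts of a fixed per-key value do the same
lemma loop3_items (v : String → List Int) (l : List String) (d : PySem.Dict String (List Int))
    (hnd : d.keys.Nodup) (hv : ∀ p ∈ d.items, p.2 = v p.1) :
    (l.foldl (fun d c => d.insert c (v c)) d).items
      = d.items ++ (newKeys d.keys l).map (fun c => (c, v c)) := by
  induction l generalizing d with
  | nil => simp [newKeys]
  | cons c t ih =>
    simp only [List.foldl_cons]
    by_cases hc : d.contains c = true
    · have hck : c ∈ d.keys := (PySem.Dict.contains_iff_mem_keys d c).mp hc
      have hitems : (d.insert c (v c)).items = d.items := by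
        rw [PySem.Dict.items_insert_of_contains d (v c) hc]
        conv_rhs => rw [← List.map_id d.items]
        apply List.map_congr_left
        intro p hp
        by_cases hpc : p.1 = c
        · simp only [hpc, BEq.rfl, if_true, id]
          have h2 : p.2 = v c := by rw [hv p hp, hpc]
          exact ((Prod.ext_iff).mpr ⟨hpc.symm, h2.symm⟩ : (c, v c) = p)
        · simp [hpc]
      rw [PySem.Dict.ext hitems, ih d hnd hv]
      simp only [newKeys, if_pos hck]
    · have hc' : d.contains c = false := by simpa using hc
      have hck : c ∉ d.keys := fun h => hc ((PySem.Dict.contains_iff_mem_keys d c).mpr h)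
      have hkeys : (d.insert c (v c)).keys = d.keys ++ [c] :=
        PySem.Dict.keys_insert_of_not_contains d (v c) hc'
      have hnd' : (d.insert c (v c)).keys.Nodup := by
        rw [hkeys]
        refine List.Nodup.append hnd (List.nodup_singleton c) ?_
        intro a ha hb
        rw [List.mem_singleton] at hb
        exact hck (hb ▸ ha)
      have hv' : ∀ p ∈ (d.insert c (v c)).items, p.2 = v p.1 := by
        intro p hp
        rcases (PySem.Dict.mem_items_insert d c (v c) p).mp hp with rfl | ⟨hp, _⟩
        · rfl
        · exact hv p hp
      rw [ih _ hnd' hv', PySem.Dict.items_insert_of_not_contains d (v c) hc', hkeys,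
        newKeys_congr (d.keys ++ [c]) (c :: d.keys) t (fun x => by simp [or_comm])]
      simp only [newKeys, if_neg hck, List.map_cons, List.append_assoc, List.singleton_append]

-- the two key orders coincide
lemma key_order_eq (keys : List String) :
    preferredOrder.filter (fun c => keys.contains c)
      ++ newKeys (preferredOrder.filter (fun c => keys.contains c))
           (PySem.List.sorted keys (fun x => x) false)
      = newKeys [] (PySem.List.sorted2 keys
           (fun c => rankDict.getD c (preferredOrder.length : Int)) (fun c => c) false) := by
  set Pfil := preferredOrder.filter (fun c => keys.contains c) with hPfil
  set S := PySem.List.sorted keys (fun x => x) false with hS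
  set L := PySem.List.sorted2 keys
      (fun c => rankDict.getD c (preferredOrder.length : Int)) (fun c => c) false with hL
  -- L is the insertion sort by beforeB
  have hLfold : L = keys.foldl (fun acc x => PySem.List.insertBy beforeB x acc) [] := rfl
  have hLpw : L.Pairwise (fun a b => beforeB b a = false) := by
    rw [hLfold]
    exact foldl_insertBy_pairwise_strict beforeB beforeB_asym beforeB_trans keys [] List.Pairwise.nil
  -- membership facts
  have hmemPfil : ∀ x, x ∈ Pfil ↔ (x ∈ preferredOrder ∧ x ∈ keys) := by
    intro x
    rw [hPfil, List.mem_filter]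
    constructor
    · exact fun ⟨h1, h2⟩ => ⟨h1, by simpa using h2⟩
    · exact fun ⟨h1, h2⟩ => ⟨h1, List.elem_eq_true_of_mem h2⟩
  have hmemN : ∀ x, x ∈ newKeys Pfil S ↔ (x ∈ keys ∧ x ∉ Pfil) := by
    intro x
    rw [mem_newKeys, hS, PySem.List.mem_sorted]
  have hnp : ∀ x ∈ newKeys Pfil S, x ∉ preferredOrder := by
    intro x hx hxp
    obtain ⟨h1, h2⟩ := (hmemN x).mp hx
    exact h2 ((hmemPfil x).mpr ⟨hxp, h1⟩)
  -- Pairwise of the left-hand side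
  have pw1 : Pfil.Pairwise (fun a b => beforeB b a = false) := by
    refine (rk_pairwise.filter _).imp ?_
    intro a b h
    rw [beforeB_eq_false_iff]
    exact ⟨lt_asymm h, Or.inl h⟩
  have pw2 : (newKeys Pfil S).Pairwise (fun a b => beforeB b a = false) := by
    have hSp : S.Pairwise (fun a b : String => a ≤ b) := PySem.List.sorted_pairwise keys (fun x => x)
    refine List.Pairwise.imp_of_mem ?_ (List.Pairwise.sublist (newKeys_sublist Pfil S) hSp)
    intro a b ha hb hab
    rw [beforeB_eq_false_iff, rk_of_not_mem a (hnp a ha), rk_of_not_mem b (hnp b hb)]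
    exact ⟨lt_irrefl _, Or.inr (not_lt.mpr hab)⟩
  have pwA : (Pfil ++ newKeys Pfil S).Pairwise (fun a b => beforeB b a = false) := by
    rw [List.pairwise_append]
    refine ⟨pw1, pw2, ?_⟩
    intro a ha b hb
    have h1 : rk a < (preferredOrder.length : Int) := rk_lt_of_mem a ((hmemPfil a).mp ha).1
    have h2 : rk b = (preferredOrder.length : Int) := rk_of_not_mem b (hnp b hb)
    rw [beforeB_eq_false_iff, h2]
    exact ⟨not_lt.mpr (le_of_lt h1), Or.inl h1⟩
  have pwB : (newKeys [] L).Pairwise (fun a b => beforeB b a = false) :=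
    List.Pairwise.sublist (newKeys_sublist [] L) hLpw
  -- both sides are Nodup with the same members
  have ndA : (Pfil ++ newKeys Pfil S).Nodup := by
    refine List.Nodup.append (nodup_preferred.filter _) (nodup_newKeys Pfil S) ?_
    intro a ha hb
    exact ((hmemN a).mp hb).2 ha
  have hperm : (Pfil ++ newKeys Pfil S).Perm (newKeys [] L) := by
    rw [List.perm_ext_iff_of_nodup ndA (nodup_newKeys [] L)]
    intro x
    rw [List.mem_append, hmemPfil x, hmemN x, mem_newKeys,
      (PySem.List.sorted2_perm keys _ _ false).mem_iff]
    constructor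
    · rintro (⟨_, h⟩ | ⟨h, _⟩) <;> exact ⟨h, List.not_mem_nil⟩
    · rintro ⟨h, -⟩
      by_cases hp : x ∈ Pfil
      · exact Or.inl ⟨((hmemPfil x).mp hp).1, h⟩
      · exact Or.inr ⟨h, hp⟩
  exact List.Perm.eq_of_pairwise
    (fun a b _ _ h1 h2 => Rle_antisymm a b h1 h2) pwA pwB hperm

-- ===== VERDICT (by name: the statement is the Claim_ definition above) =====
theorem order_categories_spec : Claim_equal_order_categories := by
  intro m _
  show order_categories m = order_categories_alt m
  unfold order_categories order_categories_alt
  rw [← List.foldl_filter]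
  set Pfil := preferredOrder.filter (fun c => (m.map Prod.fst).contains c) with hPfil
  set d1 := Pfil.foldl (fun d cat => d.insert cat (sortedVal m cat)) PySem.Dict.empty with hd1def
  have hndP : Pfil.Nodup := nodup_preferred.filter _
  have hd1 : d1.items = Pfil.map (fun c => (c, sortedVal m c)) := by
    rw [hd1def, loop3_items (sortedVal m) Pfil PySem.Dict.empty
        (by rw [PySem.Dict.keys_empty]; exact List.nodup_nil)
        (by intro p hp; exact absurd hp List.not_mem_nil)]
    rw [PySem.Dict.keys_empty,
      newKeys_eq_self [] Pfil (fun x _ => List.not_mem_nil) hndP]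
    rfl
  have hkeys1 : d1.keys = Pfil := by
    simp only [PySem.Dict.keys, hd1, List.map_map]
    exact List.map_id' _
  rw [loop2_items (sortedVal m) _ d1 (by rw [hkeys1]; exact hndP), hd1, hkeys1,
    loop3_items (sortedVal m) _ PySem.Dict.empty
      (by rw [PySem.Dict.keys_empty]; exact List.nodup_nil)
      (by intro p hp; exact absurd hp List.not_mem_nil),
    PySem.Dict.keys_empty]
  have hempty : (PySem.Dict.empty : PySem.Dict String (List Int)).items = [] := rfl
  rw [hempty]
  simp only [List.nil_append]
  rw [← List.map_append, hPfil, key_order_eq (m.map Prod.fst)]
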